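-- pv_equiv track=rewrite | github.com/binSmile/python-training | Yandex algo-train/Train 1/T1 Lesson 1/T1 Lesson 1 Problem G Детали.py | solutin
-- ===== SOURCE A (Python) =====
-- def solutin(n, k, m):
--     if n >= k >= m:
--         residual = n % k
--         nk = n // k
--         residual += (k % m) * nk
--         km = k // m
--         return km*nk + solutin(residual, k, m)
--     else:
--         return 0
-- ===== SOURCE B (Python) =====
-- def solutin(n, k, m):
--     # Material-tracking reformulation: each produced detail consumes exactly m
--     # units of material net (since (k//m)*m + k%m == k), so keep only the
--     # remaining material r in the loop and derive the count once at the end.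
--     if n < k or k < m:
--         return 0
--     r = n
--     while r >= k:
--         r -= (k // m) * m * (r // k)
--     return (n - r) // m
-- ===== Notes on version B (the rewrite author's own statement) =====
-- stated objective: alternative
-- what changed: Instead of A's recursion accumulating counts per frame, B's loop tracks only the remaining material r (each step subtracts (k//m)*m*(r//k), the net material consumed), and the count is derived once at the end as (n-r)//m, using that every detail consumes exactly m units of material net.
import Mathlib
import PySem

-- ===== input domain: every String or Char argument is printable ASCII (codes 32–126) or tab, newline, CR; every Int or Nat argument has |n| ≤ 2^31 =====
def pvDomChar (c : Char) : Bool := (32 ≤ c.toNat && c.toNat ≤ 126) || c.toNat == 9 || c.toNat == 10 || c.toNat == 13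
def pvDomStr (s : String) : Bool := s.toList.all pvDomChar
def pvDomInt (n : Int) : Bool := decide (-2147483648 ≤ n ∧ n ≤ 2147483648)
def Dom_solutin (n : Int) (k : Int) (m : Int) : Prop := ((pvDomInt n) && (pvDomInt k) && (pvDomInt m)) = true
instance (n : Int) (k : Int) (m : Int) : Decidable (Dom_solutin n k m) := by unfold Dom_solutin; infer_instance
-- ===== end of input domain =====

-- B tracks only the remaining material in a loop and derives the count at the end as (n-r)//m; objective: alternative (O(1) space).


-- ===== PORT A =====
-- A's recursion, made total with fuel; (n - k + 1).toNat + 1 steps always suffice on Pre_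
-- (each guard-true step strictly decreases n while n ≥ k).
def solutinFuelA : Nat → Int → Int → Int → Int
  | 0, _, _, _ => 0
  | fuel + 1, n, k, m =>
    if n ≥ k ∧ k ≥ m then
      let residual := PySem.Int.mod n k
      let nk := PySem.Int.floordiv n k
      let residual := residual + (PySem.Int.mod k m) * nk
      let km := PySem.Int.floordiv k m
      km * nk + solutinFuelA fuel residual k m
    else 0

def solutin (n : Int) (k : Int) (m : Int) : Int :=
  solutinFuelA ((n - k + 1).toNat + 1) n k m

-- ===== PORT B =====
-- B's while-loop over the single state r, made total with the same fuel bound.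
def solutinLoopB : Nat → Int → Int → Int → Int
  | 0, r, _, _ => r
  | fuel + 1, r, k, m =>
    if r ≥ k then
      solutinLoopB fuel (r - (PySem.Int.floordiv k m) * m * (PySem.Int.floordiv r k)) k m
    else r

def solutin_alt (n : Int) (k : Int) (m : Int) : Int :=
  if n < k ∨ k < m then 0
  else
    let r := solutinLoopB ((n - k + 1).toNat + 1) n k m
    PySem.Int.floordiv (n - r) m

-- ===== PRECONDITION & SPEC =====
-- Pre_ excludes exactly the inputs where Python A does not return: guard true with
-- k = 0 or m = 0 (ZeroDivisionError) and guard true with k < 0 ∧ m < 0 (infinite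
-- recursion, RecursionError).
def Pre_solutin (n : Int) (k : Int) (m : Int) : Prop :=
  ¬ (n ≥ k ∧ k ≥ m) ∨ m > 0 ∨ (m < 0 ∧ k > 0)
instance (n : Int) (k : Int) (m : Int) : Decidable (Pre_solutin n k m) := by
  unfold Pre_solutin; infer_instance

def pvWitness_solutin : Int × Int × Int := (10, 3, 2)

def Spec_solutin (n : Int) (k : Int) (m : Int) (out : Int) : Prop := out = solutin_alt n k m
instance (n : Int) (k : Int) (m : Int) (out : Int) : Decidable (Spec_solutin n k m out) := by
  unfold Spec_solutin; infer_instance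

-- ===== CLAIM (what is proved, stated in full; the proofs are below) =====
def Claim_equal_solutin : Prop := ∀ (n : Int) (k : Int) (m : Int),
  Dom_solutin n k m → Pre_solutin n k m → Spec_solutin n k m (solutin n k m)

-- ===== LEMMAS AND PROOFS =====

-- B's material loop equals the start material minus m times A's count, for any fuel,
-- whenever k ≥ m (so the two guards coincide; the div/mod identity holds for every divisor).
theorem loopB_eq_fuelA (fuel : Nat) (k m : Int) (hkm : k ≥ m) :
    ∀ (r : Int), solutinLoopB fuel r k m = r - m * solutinFuelA fuel r k m := by
  induction fuel with
  | zero => intro r; simp [solutinLoopB, solutinFuelA]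
  | succ f ih =>
    intro r
    by_cases h : r ≥ k
    · simp only [solutinLoopB, solutinFuelA, if_pos h, if_pos (And.intro h hkm)]
      have hkid := PySem.Int.floordiv_mul_add_mod r k
      have hmid := PySem.Int.floordiv_mul_add_mod k m
      have hres : r - PySem.Int.floordiv k m * m * PySem.Int.floordiv r k =
          PySem.Int.mod r k + PySem.Int.mod k m * PySem.Int.floordiv r k := by
        linear_combination -hkid - PySem.Int.floordiv r k * hmid
      rw [hres, ih]
      linear_combination -hres
    · simp only [solutinLoopB, solutinFuelA, if_neg h,
        if_neg (fun hc : r ≥ k ∧ k ≥ m => h hc.1)]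
      ring

-- ===== VERDICT (by name: the statement is the Claim_ definition above) =====
theorem solutin_spec : Claim_equal_solutin := by
  intro n k m _ hpre
  unfold Spec_solutin solutin solutin_alt
  by_cases hg : n < k ∨ k < m
  · rw [if_pos hg]
    cases hf : ((n - k + 1).toNat + 1) with
    | zero => simp at hf
    | succ f =>
      have : ¬ (n ≥ k ∧ k ≥ m) := by omega
      simp only [solutinFuelA, if_neg this]
  · rw [if_neg hg]
    have hnk : n ≥ k := by omega
    have hkm : k ≥ m := by omega
    have hm : m ≠ 0 := by
      rcases hpre with h | h | h
      · exact absurd ⟨hnk, hkm⟩ h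
      · omega
      · omega
    rw [loopB_eq_fuelA _ _ _ hkm]
    show solutinFuelA ((n - k + 1).toNat + 1) n k m =
      PySem.Int.floordiv (n - (n - m * solutinFuelA ((n - k + 1).toNat + 1) n k m)) m
    rw [sub_sub_cancel, PySem.Int.floordiv]
    exact (Int.mul_fdiv_cancel_left _ hm).symm
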